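-- pv_equiv track=rewrite | github.com/sazit/hackerrank | misc/decode/decode.py | output_specific_elements
-- ===== SOURCE A (Python) =====
-- def output_specific_elements(arr):
--     # Initialize variables
--     output_elements = []
--     index = 0  # This will track the current index to be accessed
--     step = 2   # This will track the current step size
--
--     # Loop until the index exceeds the length of the array
--     while index < len(arr):
--         # Append the current element to the output list
--         output_elements.append(arr[index])
--         # Update the index for the next element based on the step
--         index += step
--         # Increase the step size for the next iteration
--         step += 1
--
--     return output_elements
-- ===== SOURCE B (Python) =====
-- def output_specific_elements(arr):
--     # Single counter k; access index is the closed form k*(k+3)//2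
--     # (0, 2, 5, 9, 14, ... -- the same indices A reaches by accumulating a growing step).
--     out = []
--     k = 0
--     while k * (k + 3) // 2 < len(arr):
--         out.append(arr[k * (k + 3) // 2])
--         k += 1
--     return out
-- ===== Notes on version B (the rewrite author's own statement) =====
-- stated objective: simpler
-- what changed: Replaces the dual accumulator (index plus growing step) with a single counter k and the closed-form access index k*(k+3)//2, so the loop carries one variable instead of two.
import Mathlib
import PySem

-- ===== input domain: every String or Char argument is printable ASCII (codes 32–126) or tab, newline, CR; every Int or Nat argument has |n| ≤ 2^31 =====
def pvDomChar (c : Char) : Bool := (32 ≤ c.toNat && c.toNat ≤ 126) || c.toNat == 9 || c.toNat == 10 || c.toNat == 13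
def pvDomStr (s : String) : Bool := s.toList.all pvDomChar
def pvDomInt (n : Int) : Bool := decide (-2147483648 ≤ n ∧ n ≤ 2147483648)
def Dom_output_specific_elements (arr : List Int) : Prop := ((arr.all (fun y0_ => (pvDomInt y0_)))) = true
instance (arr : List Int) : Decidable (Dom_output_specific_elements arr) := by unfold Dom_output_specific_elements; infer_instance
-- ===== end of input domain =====

-- B replaces A's dual accumulator (index + growing step) with one counter k and the
-- closed-form access index k*(k+3)//2 (objective: simpler loop state).

-- ===== PORT A =====
-- A's while loop: two accumulators, current index and growing step (both stay ≥ 0;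
-- the 0 < step argument records the loop invariant needed for termination).
def pvLoopA (arr : List Int) (index step : Nat) (hs : 0 < step) : List Int :=
  if h : index < arr.length then
    arr[index] :: pvLoopA arr (index + step) (step + 1) (by omega)
  else []
termination_by arr.length - index
decreasing_by omega

def output_specific_elements (arr : List Int) : List Int :=
  pvLoopA arr 0 2 (by omega)

-- ===== PORT B =====
-- Source B's access index k*(k+3)//2 (Nat division = Python // on these nonnegative values)
def pvIdx (k : Nat) : Nat := k * (k + 3) / 2

-- needed by pvLoopB's termination proof
theorem pvIdx_succ (k : Nat) : pvIdx (k + 1) = pvIdx k + (k + 2) := by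
  unfold pvIdx
  have h : (k + 1) * ((k + 1) + 3) = k * (k + 3) + (k + 2) * 2 := by ring
  rw [h, Nat.add_mul_div_right _ _ (by omega : 0 < 2)]

def pvLoopB (arr : List Int) (k : Nat) : List Int :=
  if h : pvIdx k < arr.length then
    arr[pvIdx k] :: pvLoopB arr (k + 1)
  else []
termination_by arr.length - pvIdx k
decreasing_by rw [pvIdx_succ]; omega

def output_specific_elements_alt (arr : List Int) : List Int :=
  pvLoopB arr 0

-- ===== PRECONDITION & SPEC =====
def Spec_output_specific_elements (arr : List Int) (out : List Int) : Prop := out = output_specific_elements_alt arr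
instance (arr : List Int) (out : List Int) : Decidable (Spec_output_specific_elements arr out) := by unfold Spec_output_specific_elements; infer_instance

-- ===== CLAIM (what is proved, stated in full; the proofs are below) =====
def Claim_equal_output_specific_elements : Prop := ∀ (arr : List Int), Dom_output_specific_elements arr → Spec_output_specific_elements arr (output_specific_elements arr)

-- ===== LEMMAS AND PROOFS =====
-- Invariant: after k iterations A's index is pvIdx k and its step is k+2.
theorem pvLoop_eq (arr : List Int) (n : Nat) :
    ∀ k, arr.length - pvIdx k ≤ n →
      pvLoopA arr (pvIdx k) (k + 2) (by omega) = pvLoopB arr k := by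
  induction n with
  | zero =>
    intro k hk
    rw [pvLoopA, pvLoopB]
    have : ¬ pvIdx k < arr.length := by omega
    simp [this]
  | succ n ih =>
    intro k hk
    rw [pvLoopA, pvLoopB]
    by_cases h : pvIdx k < arr.length
    · simp only [h, dif_pos]
      have he : pvIdx k + (k + 2) = pvIdx (k + 1) := (pvIdx_succ k).symm
      have hk' : arr.length - pvIdx (k + 1) ≤ n := by rw [pvIdx_succ]; omega
      have := ih (k + 1) hk'
      congr 1
      · simpa [he] using this
    · simp [h]

-- ===== VERDICT (by name: the statement is the Claim_ definition above) =====
theorem output_specific_elements_spec : Claim_equal_output_specific_elements := by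
  intro arr _
  unfold Spec_output_specific_elements output_specific_elements output_specific_elements_alt
  have h := pvLoop_eq arr (arr.length - pvIdx 0) 0 (le_refl _)
  simpa [pvIdx] using h
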